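-- pv_equiv track=rewrite | github.com/hyp1231/AmazonReviews2023 | benchmark_scripts/kcore_filtering.py | make_inters_in_order
-- ===== SOURCE A (Python) =====
-- import collections
--
-- def make_inters_in_order(inters):
--     user2inters, new_inters = collections.defaultdict(list), []
--     for inter in inters:
--         user, item, rating, timestamp = inter
--         user2inters[user].append((user, item, rating, timestamp))
--     for user in user2inters:
--         user_inters = user2inters[user]
--         user_inters.sort(key=lambda d: d[3])
--         his_items = set()
--         for inter in user_inters:
--             user, item, rating, timestamp = inter
--             if item in his_items:
--                 continue
--             his_items.add(item)
--             new_inters.append(inter)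
--     return new_inters
-- ===== SOURCE B (Python) =====
-- def make_inters_in_order(inters):
--     # Dedup BEFORE sorting: one pass keeps, per (user, item), only the earliest
--     # interaction (min by (timestamp, original position) -- exactly the one A's
--     # stable sort-then-dedup would keep); then only the few surviving
--     # representatives per user are sorted, by (timestamp, original position).
--     best = {}
--     for idx, rec in enumerate(inters):
--         key = (rec[0], rec[1])
--         cur = best.get(key)
--         if cur is None or (rec[3], idx) < (cur[0], cur[1]):
--             best[key] = (rec[3], idx, rec)
--     groups = {}
--     for (user, _item), triple in best.items():
--         groups.setdefault(user, []).append(triple)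
--     out = []
--     for reps in groups.values():
--         reps.sort(key=lambda t: (t[0], t[1]))
--         out.extend(t[2] for t in reps)
--     return out
-- ===== Notes on version B (the rewrite author's own statement) =====
-- stated objective: alternative
-- what changed: Reverses A's sort-then-dedup into dedup-then-sort: a single pass computes, per (user,item), the minimum interaction under (timestamp, original position), and only those representatives are sorted per user, instead of sorting every user's full interaction list and then filtering duplicates with a seen-set.
import Mathlib
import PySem

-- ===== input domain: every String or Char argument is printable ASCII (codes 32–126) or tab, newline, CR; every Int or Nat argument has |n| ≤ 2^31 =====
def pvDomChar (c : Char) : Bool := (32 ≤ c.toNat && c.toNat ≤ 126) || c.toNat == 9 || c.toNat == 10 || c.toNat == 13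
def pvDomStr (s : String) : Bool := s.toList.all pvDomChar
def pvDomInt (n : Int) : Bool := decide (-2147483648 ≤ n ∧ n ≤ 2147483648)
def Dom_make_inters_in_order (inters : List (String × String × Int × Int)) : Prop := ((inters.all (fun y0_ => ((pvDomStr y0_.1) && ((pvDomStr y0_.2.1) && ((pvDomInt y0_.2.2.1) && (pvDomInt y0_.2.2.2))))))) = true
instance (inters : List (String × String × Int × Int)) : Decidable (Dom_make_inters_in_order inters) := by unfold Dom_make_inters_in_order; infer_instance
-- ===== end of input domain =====

-- B reverses A's sort-then-dedup into dedup-then-sort: one pass keeps, per (user, item),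
-- the minimum interaction under (timestamp, original position); only those
-- representatives are then sorted per user.

-- ===== PORT A =====
-- the body of A's inner dedup loop ('if item in his_items: continue; …')
def pvDedupStep (st : List (String × String × Int × Int) × PySem.Set String)
    (inter : String × String × Int × Int) :
    List (String × String × Int × Int) × PySem.Set String :=
  if PySem.Set.contains st.2 inter.2.1 then st
  else (st.1 ++ [inter], PySem.Set.add st.2 inter.2.1)

def make_inters_in_order (inters : List (String × String × Int × Int)) : List (String × String × Int × Int) :=
  -- user2inters = defaultdict(list); for inter in inters: user2inters[user].append(inter)
  let user2inters : PySem.Dict String (List (String × String × Int × Int)) :=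
    inters.foldl (fun d inter => d.modify inter.1 [] (fun v => v ++ [inter])) PySem.Dict.empty
  -- for user in user2inters: sort the user's list by timestamp, then dedup items
  user2inters.keys.foldl (fun new_inters user =>
    let user_inters := PySem.List.sorted (user2inters.getD user []) (fun d => d.2.2.2)
    (user_inters.foldl pvDedupStep (new_inters, PySem.Set.empty)).1) []

-- ===== PORT B =====
-- 'cur = best.get(key); if cur is None or (rec[3], idx) < (cur[0], cur[1]): best[key] = (rec[3], idx, rec)'
def pvBestStep (d : PySem.Dict (String × String) (Int × Int × (String × String × Int × Int)))
    (p : Int × (String × String × Int × Int)) :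
    PySem.Dict (String × String) (Int × Int × (String × String × Int × Int)) :=
  match d.get? (p.2.1, p.2.2.1) with
  | none => d.insert (p.2.1, p.2.2.1) (p.2.2.2.2, p.1, p.2)
  | some c =>
      if p.2.2.2.2 < c.1 ∨ (p.2.2.2.2 = c.1 ∧ p.1 < c.2.1) then
        d.insert (p.2.1, p.2.2.1) (p.2.2.2.2, p.1, p.2)
      else d

def make_inters_in_order_alt (inters : List (String × String × Int × Int)) : List (String × String × Int × Int) :=
  -- for idx, rec in enumerate(inters): keep the (timestamp, idx)-minimal record per (user, item)
  let best := (PySem.List.enumerate inters 0).foldl pvBestStep PySem.Dict.empty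
  -- for (user, _item), triple in best.items(): groups.setdefault(user, []).append(triple)
  let groups : PySem.Dict String (List (Int × Int × (String × String × Int × Int))) :=
    best.items.foldl (fun d q => d.modify q.1.1 [] (fun v => v ++ [q.2])) PySem.Dict.empty
  -- for reps in groups.values(): reps.sort(key=lambda t: (t[0], t[1])); out.extend(t[2] …)
  groups.values.foldl (fun out reps =>
    out ++ (PySem.List.sorted2 reps (fun t => t.1) (fun t => t.2.1)).map (fun t => t.2.2)) []

-- ===== PRECONDITION & SPEC =====
def Spec_make_inters_in_order (inters : List (String × String × Int × Int)) (out : List (String × String × Int × Int)) : Prop := out = make_inters_in_order_alt inters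
instance (inters : List (String × String × Int × Int)) (out : List (String × String × Int × Int)) : Decidable (Spec_make_inters_in_order inters out) := by unfold Spec_make_inters_in_order; infer_instance

-- ===== CLAIM (what is proved, stated in full; the proofs are below) =====
def Claim_equal_make_inters_in_order : Prop := ∀ (inters : List (String × String × Int × Int)), Dom_make_inters_in_order inters → Spec_make_inters_in_order inters (make_inters_in_order inters)

-- ===== LEMMAS AND PROOFS =====

abbrev pvR : Type := String × String × Int × Int        -- one interaction record
abbrev pvP : Type := Int × pvR                          -- enumerated record (original position, record)
abbrev pvT : Type := Int × Int × pvR                    -- stored triple (timestamp, position, record)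

def pvPhi (p : pvP) : pvT := (p.2.2.2.2, p.1, p.2)
-- strict (timestamp, position) order, on enumerated records and on triples
abbrev pvLtP (a b : pvP) : Prop := a.2.2.2.2 < b.2.2.2.2 ∨ (a.2.2.2.2 = b.2.2.2.2 ∧ a.1 < b.1)
abbrev pvLtT (a b : pvT) : Prop := a.1 < b.1 ∨ (a.1 = b.1 ∧ a.2.1 < b.2.1)

-- the comparator sorted2 uses for a two-component Int key
def pvCmp {α : Type} (k1 k2 : α → Int) (a b : α) : Bool :=
  decide (k1 a < k1 b) || (!decide (k1 b < k1 a) && decide (k2 a < k2 b))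

theorem pv_sorted2_eq_foldl {α : Type} (xs : List α) (k1 k2 : α → Int) :
    PySem.List.sorted2 xs k1 k2 = xs.foldl (fun acc x => PySem.List.insertBy (pvCmp k1 k2) x acc) [] := rfl

theorem pv_cmp_true_iff {α : Type} (k1 k2 : α → Int) (a b : α) :
    pvCmp k1 k2 a b = true ↔ (k1 a < k1 b ∨ (¬ (k1 b < k1 a) ∧ k2 a < k2 b)) := by
  simp [pvCmp]

theorem pv_cmp_false_iff {α : Type} (k1 k2 : α → Int) (a b : α) :
    pvCmp k1 k2 a b = false ↔ ¬ (k1 a < k1 b ∨ (¬ (k1 b < k1 a) ∧ k2 a < k2 b)) := by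
  rw [Bool.eq_false_iff, Ne]
  exact not_congr (pv_cmp_true_iff k1 k2 a b)

theorem pv_cmp_asym {α : Type} (k1 k2 : α → Int) (a b : α) :
    pvCmp k1 k2 a b = true → pvCmp k1 k2 b a = false := by
  rw [pv_cmp_true_iff, pv_cmp_false_iff]
  omega

theorem pv_cmp_negtrans {α : Type} (k1 k2 : α → Int) (a b c : α) :
    pvCmp k1 k2 a b = false → pvCmp k1 k2 b c = false → pvCmp k1 k2 a c = false := by
  rw [pv_cmp_false_iff, pv_cmp_false_iff, pv_cmp_false_iff]
  omega

-- ---- generic insertBy machinery ----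

theorem pv_insertBy_perm {α : Type} (before : α → α → Bool) (x : α) :
    ∀ l : List α, (PySem.List.insertBy before x l).Perm (x :: l) := by
  intro l
  induction l with
  | nil => simp [PySem.List.insertBy]
  | cons y t ih =>
    by_cases h : before x y = true
    · simp [PySem.List.insertBy, h]
    · simp only [PySem.List.insertBy, h]
      exact ((ih.cons y).trans (List.Perm.swap x y t))

theorem pv_foldl_insertBy_perm {α : Type} (before : α → α → Bool) :
    ∀ (xs acc : List α), (xs.foldl (fun acc x => PySem.List.insertBy before x acc) acc).Perm (xs ++ acc) := by
  intro xs
  induction xs with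
  | nil => intro acc; simp
  | cons x t ih =>
    intro acc
    simp only [List.foldl_cons, List.cons_append]
    exact (ih _).trans ((List.Perm.append_left t (pv_insertBy_perm before x acc)).trans
      List.perm_middle)

theorem pv_insertBy_pairwise {α : Type} (before : α → α → Bool)
    (hasym : ∀ a b, before a b = true → before b a = false)
    (hneg : ∀ a b c, before a b = false → before b c = false → before a c = false) (x : α) :
    ∀ l : List α, l.Pairwise (fun a b => before b a = false) →
      (PySem.List.insertBy before x l).Pairwise (fun a b => before b a = false) := by
  intro l
  induction l with
  | nil => intro _; simp [PySem.List.insertBy]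
  | cons y t ih =>
    intro hl
    obtain ⟨hy, ht⟩ := List.pairwise_cons.mp hl
    by_cases h : before x y = true
    · simp only [PySem.List.insertBy, h, if_pos]
      refine List.pairwise_cons.mpr ⟨?_, hl⟩
      intro z hz
      rcases List.mem_cons.mp hz with rfl | hz
      · exact hasym _ _ h
      · exact hneg z y x (hy z hz) (hasym _ _ h)
    · simp only [PySem.List.insertBy, h, if_neg, Bool.false_eq_true, not_false_iff]
      refine List.pairwise_cons.mpr ⟨?_, ih ht⟩
      intro z hz
      rcases (PySem.List.mem_insertBy _ _ _ _).mp hz with rfl | hz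
      · simpa using h
      · exact hy z hz

theorem pv_foldl_insertBy_pairwise {α : Type} (before : α → α → Bool)
    (hasym : ∀ a b, before a b = true → before b a = false)
    (hneg : ∀ a b c, before a b = false → before b c = false → before a c = false) :
    ∀ (xs acc : List α), acc.Pairwise (fun a b => before b a = false) →
      (xs.foldl (fun acc x => PySem.List.insertBy before x acc) acc).Pairwise
        (fun a b => before b a = false) := by
  intro xs
  induction xs with
  | nil => intro acc h; simpa using h
  | cons x t ih =>
    intro acc h
    exact ih _ (pv_insertBy_pairwise before hasym hneg x acc h)

-- a strictly ordered permutation is THE sorted arrangement (uniqueness)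
theorem pv_unique {α : Type} (before : α → α → Bool) :
    ∀ (ys zs : List α), ys.Pairwise (fun a b => before a b = true) →
      zs.Pairwise (fun a b => before b a = false) → zs.Perm ys → zs = ys := by
  intro ys
  induction ys with
  | nil => intro zs _ _ hp; exact hp.eq_nil
  | cons a ys ih =>
    intro zs hys hzs hp
    cases zs with
    | nil => exact absurd hp.symm.eq_nil (by simp)
    | cons b zs' =>
      obtain ⟨hb, hzs'⟩ := List.pairwise_cons.mp hzs
      obtain ⟨ha, hys'⟩ := List.pairwise_cons.mp hys
      have hab : b = a := by
        by_contra hne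
        have hbin : b ∈ a :: ys := hp.mem_iff.mp (by simp)
        have hbys : b ∈ ys := by
          rcases List.mem_cons.mp hbin with h | h
          · exact absurd h hne
          · exact h
        have h1 : before a b = true := ha b hbys
        have hain : a ∈ b :: zs' := hp.mem_iff.mpr (by simp)
        have hazs : a ∈ zs' := by
          rcases List.mem_cons.mp hain with h | h
          · exact absurd h.symm hne
          · exact h
        have h2 : before a b = false := hb a hazs
        simp [h1] at h2
      subst hab
      exact congrArg (List.cons b) (ih zs' hys' hzs' hp.cons_inv)

-- sorted2 is the unique (k1, k2)-lex sorted arrangement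
theorem pv_sorted2_eq {α : Type} (xs ys : List α) (k1 k2 : α → Int)
    (hperm : ys.Perm xs) (hp : ys.Pairwise (fun a b => pvCmp k1 k2 a b = true)) :
    PySem.List.sorted2 xs k1 k2 = ys := by
  rw [pv_sorted2_eq_foldl]
  refine pv_unique (pvCmp k1 k2) ys _ hp ?_ ?_
  · exact pv_foldl_insertBy_pairwise _ (pv_cmp_asym k1 k2) (pv_cmp_negtrans k1 k2) xs []
      (by simp)
  · exact ((pv_foldl_insertBy_perm _ xs []).trans (by simp)).trans hperm.symm

theorem pv_sorted2_pairwise {α : Type} (xs : List α) (k1 k2 : α → Int) :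
    (PySem.List.sorted2 xs k1 k2).Pairwise (fun a b => pvCmp k1 k2 b a = false) := by
  rw [pv_sorted2_eq_foldl]
  exact pv_foldl_insertBy_pairwise _ (pv_cmp_asym k1 k2) (pv_cmp_negtrans k1 k2) xs [] (by simp)

theorem pv_mem_sorted2 {α : Type} (xs : List α) (k1 k2 : α → Int) (y : α) :
    y ∈ PySem.List.sorted2 xs k1 k2 ↔ y ∈ xs :=
  (PySem.List.sorted2_perm xs k1 k2 false).mem_iff

-- ---- stability: a stable key-sort is the lex (key, position) sort of the enumerated list ----

theorem pv_sorted_append {α : Type} (xs : List α) (x : α) (key : α → Int) :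
    PySem.List.sorted (xs ++ [x]) key
      = PySem.List.insertBy (fun a b => decide (key a < key b)) x (PySem.List.sorted xs key) := by
  rw [PySem.List.sorted_eq_foldl_insertBy, PySem.List.sorted_eq_foldl_insertBy, List.foldl_append]
  rfl

theorem pv_sorted2_append {α : Type} (xs : List α) (x : α) (k1 k2 : α → Int) :
    PySem.List.sorted2 (xs ++ [x]) k1 k2
      = PySem.List.insertBy (pvCmp k1 k2) x (PySem.List.sorted2 xs k1 k2) := by
  rw [pv_sorted2_eq_foldl, pv_sorted2_eq_foldl, List.foldl_append]
  rfl

theorem pv_insertBy_tag {β : Type} (key : β → Int) (i : Int) (x : β) :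
    ∀ acc : List (Int × β), (∀ p ∈ acc, p.1 < i) →
      PySem.List.insertBy (fun a b => decide (key a < key b)) x (acc.map (fun p => p.2))
        = (PySem.List.insertBy (pvCmp (fun p => key p.2) (fun p => p.1)) (i, x) acc).map
            (fun p => p.2) := by
  intro acc
  induction acc with
  | nil => intro _; simp [PySem.List.insertBy]
  | cons q t ih =>
    intro h
    have hq : q.1 < i := h q (by simp)
    have hcmp : pvCmp (fun p : Int × β => key p.2) (fun p => p.1) (i, x) q
        = decide (key x < key q.2) := by
      simp only [pvCmp]
      by_cases hk : key x < key q.2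
      · simp [hk]
      · simp [hk]; omega
    by_cases hk : key x < key q.2
    · simp [PySem.List.insertBy, hcmp, hk]
    · have e1 : PySem.List.insertBy (fun a b => decide (key a < key b)) x
          (q.2 :: t.map (fun p => p.2))
          = q.2 :: PySem.List.insertBy (fun a b => decide (key a < key b)) x
              (t.map (fun p => p.2)) := by
        simp [PySem.List.insertBy, hk]
      have e2 : PySem.List.insertBy (pvCmp (fun p : Int × β => key p.2) (fun p => p.1)) (i, x)
          (q :: t)
          = q :: PySem.List.insertBy (pvCmp (fun p : Int × β => key p.2) (fun p => p.1)) (i, x)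
              t := by
        simp [PySem.List.insertBy, hcmp, hk]
      rw [List.map_cons, e1, e2, List.map_cons, ih (fun p hp => h p (by simp [hp]))]

theorem pv_stable {β : Type} (key : β → Int) :
    ∀ E : List (Int × β), E.Pairwise (fun p q => p.1 < q.1) →
      PySem.List.sorted (E.map (fun p => p.2)) key
        = (PySem.List.sorted2 E (fun p => key p.2) (fun p => p.1)).map (fun p => p.2) := by
  intro E
  induction E using List.reverseRecOn with
  | nil => simp [PySem.List.sorted_eq_foldl_insertBy, pv_sorted2_eq_foldl]
  | append_singleton E p ih =>
    intro hE
    obtain ⟨hE', -, htag⟩ := List.pairwise_append.mp hE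
    have htag' : ∀ q ∈ E, q.1 < p.1 := fun q hq => htag q hq p (by simp)
    rw [List.map_append, List.map_singleton, pv_sorted_append, ih hE', pv_sorted2_append]
    have : ∀ q ∈ PySem.List.sorted2 E (fun p => key p.2) (fun p => p.1), q.1 < p.1 :=
      fun q hq => htag' q ((pv_mem_sorted2 _ _ _ _).mp hq)
    exact pv_insertBy_tag key p.1 p.2 _ this

-- ---- A's dedup loop as a structural recursion ----

theorem pv_contains_iff' {α : Type} [BEq α] [LawfulBEq α] (s : PySem.Set α) (x : α) :
    PySem.Set.contains s x = true ↔ x ∈ s := List.contains_iff_mem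

def pvDD (s : PySem.Set String) : List pvR → List pvR
  | [] => []
  | x :: t => if PySem.Set.contains s x.2.1 then pvDD s t
              else x :: pvDD (PySem.Set.add s x.2.1) t

theorem pv_foldl_dedup (l : List pvR) :
    ∀ (acc : List pvR) (s : PySem.Set String),
      (l.foldl pvDedupStep (acc, s)).1 = acc ++ pvDD s l := by
  induction l with
  | nil => intro acc s; simp [pvDD]
  | cons x t ih =>
    intro acc s
    by_cases h : x.2.1 ∈ s
    · simp [pvDD, pvDedupStep, h, ih]
    · simp [pvDD, pvDedupStep, h, ih]

def pvDDE (s : PySem.Set String) : List pvP → List pvP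
  | [] => []
  | p :: t => if PySem.Set.contains s p.2.2.1 then pvDDE s t
              else p :: pvDDE (PySem.Set.add s p.2.2.1) t

theorem pv_dd_map (l : List pvP) : ∀ s, pvDD s (l.map (fun p => p.2)) = (pvDDE s l).map (fun p => p.2) := by
  induction l with
  | nil => intro s; simp [pvDD, pvDDE]
  | cons p t ih =>
    intro s
    by_cases h : p.2.2.1 ∈ s
    · simp [pvDD, pvDDE, h, ih]
    · simp [pvDD, pvDDE, h, ih]

theorem pv_dde_not_mem : ∀ (l : List pvP) (s : PySem.Set String) (q : pvP),
    q ∈ pvDDE s l → q.2.2.1 ∉ s := by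
  intro l
  induction l with
  | nil => intro s q hq; simp [pvDDE] at hq
  | cons p t ih =>
    intro s q hq
    by_cases h : p.2.2.1 ∈ s
    · rw [pvDDE, if_pos ((pv_contains_iff' _ _).mpr h)] at hq
      exact ih s q hq
    · rw [pvDDE, if_neg (fun hc => h ((pv_contains_iff' _ _).mp hc))] at hq
      rcases List.mem_cons.mp hq with rfl | hq
      · exact h
      · intro hqs
        exact ih _ q hq ((PySem.Set.mem_add _ _ _).mpr (Or.inl hqs))

theorem pv_dde_sublist : ∀ (l : List pvP) (s : PySem.Set String), (pvDDE s l).Sublist l := by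
  intro l
  induction l with
  | nil => intro s; simp [pvDDE]
  | cons p t ih =>
    intro s
    by_cases h : p.2.2.1 ∈ s
    · rw [pvDDE, if_pos ((pv_contains_iff' _ _).mpr h)]
      exact (ih s).cons p
    · rw [pvDDE, if_neg (fun hc => h ((pv_contains_iff' _ _).mp hc))]
      exact (ih _).cons₂ p

theorem pv_dde_mem_item : ∀ (l : List pvP) (s : PySem.Set String) (j : String),
    (j ∈ (pvDDE s l).map (fun p => p.2.2.1)) ↔ (j ∈ l.map (fun p => p.2.2.1) ∧ j ∉ s) := by
  intro l
  induction l with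
  | nil => intro s j; simp [pvDDE]
  | cons p t ih =>
    intro s j
    by_cases h : p.2.2.1 ∈ s
    · rw [pvDDE, if_pos ((pv_contains_iff' _ _).mpr h)]
      rw [ih]
      simp only [List.map_cons, List.mem_cons]
      constructor
      · rintro ⟨hj, hjs⟩; exact ⟨Or.inr hj, hjs⟩
      · rintro ⟨hj | hj, hjs⟩
        · exact absurd (hj ▸ h) hjs
        · exact ⟨hj, hjs⟩
    · rw [pvDDE, if_neg (fun hc => h ((pv_contains_iff' _ _).mp hc))]
      simp only [List.map_cons, List.mem_cons, ih, PySem.Set.mem_add]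
      constructor
      · rintro (rfl | ⟨hj, hjs⟩)
        · exact ⟨Or.inl rfl, h⟩
        · exact ⟨Or.inr hj, fun hm => hjs (Or.inl hm)⟩
      · rintro ⟨rfl | hj, hjs⟩
        · exact Or.inl rfl
        · by_cases hjp : j = p.2.2.1
          · exact Or.inl hjp
          · exact Or.inr ⟨hj, fun hm => (hm.elim hjs hjp)⟩

theorem pv_dde_nodup_item : ∀ (l : List pvP) (s : PySem.Set String),
    ((pvDDE s l).map (fun p => p.2.2.1)).Nodup := by
  intro l
  induction l with
  | nil => intro s; simp [pvDDE]
  | cons p t ih =>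
    intro s
    by_cases h : p.2.2.1 ∈ s
    · rw [pvDDE, if_pos ((pv_contains_iff' _ _).mpr h)]
      exact ih s
    · rw [pvDDE, if_neg (fun hc => h ((pv_contains_iff' _ _).mp hc))]
      simp only [List.map_cons, List.nodup_cons]
      refine ⟨?_, ih _⟩
      intro hmem
      have := ((pv_dde_mem_item t _ p.2.2.1).mp hmem).2
      exact this ((PySem.Set.mem_add _ _ _).mpr (Or.inr rfl))

-- in a pvLtP-sorted list, each kept first occurrence is its item's strict minimum
theorem pv_dde_min : ∀ (l : List pvP) (s : PySem.Set String), l.Pairwise pvLtP →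
    ∀ q ∈ pvDDE s l, ∀ r ∈ l, r.2.2.1 = q.2.2.1 → q = r ∨ pvLtP q r := by
  intro l
  induction l with
  | nil => intro s _ q hq; simp [pvDDE] at hq
  | cons p t ih =>
    intro s hl q hq r hr hitem
    obtain ⟨hp, ht⟩ := List.pairwise_cons.mp hl
    by_cases h : p.2.2.1 ∈ s
    · rw [pvDDE, if_pos ((pv_contains_iff' _ _).mpr h)] at hq
      rcases List.mem_cons.mp hr with rfl | hr
      · have : q.2.2.1 ∉ s := pv_dde_not_mem t s q hq
        exact absurd (hitem ▸ h) this
      · exact ih s ht q hq r hr hitem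
    · rw [pvDDE, if_neg (fun hc => h ((pv_contains_iff' _ _).mp hc))] at hq
      rcases List.mem_cons.mp hq with rfl | hq
      · rcases List.mem_cons.mp hr with rfl | hr
        · exact Or.inl rfl
        · exact Or.inr (hp r hr)
      · have hqs : q.2.2.1 ∉ PySem.Set.add s p.2.2.1 := pv_dde_not_mem t _ q hq
        have hqp : q.2.2.1 ≠ p.2.2.1 :=
          fun hcon => hqs ((PySem.Set.mem_add _ _ _).mpr (Or.inr hcon))
        rcases List.mem_cons.mp hr with rfl | hr
        · exact absurd hitem.symm hqp
        · exact ih _ ht q hq r hr hitem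

-- ---- B's per-(user,item) running minimum ----

def pvMStep (c : Option pvT) (p : pvP) : Option pvT :=
  match c with
  | none => some (pvPhi p)
  | some m => if p.2.2.2.2 < m.1 ∨ (p.2.2.2.2 = m.1 ∧ p.1 < m.2.1) then some (pvPhi p) else c

theorem pv_best_get? : ∀ (E : List pvP) (d : PySem.Dict (String × String) pvT) (k : String × String),
    ((E.foldl pvBestStep d).get? k)
      = (E.filter (fun p => (p.2.1, p.2.2.1) == k)).foldl pvMStep (d.get? k) := by
  intro E
  induction E with
  | nil => intro d k; simp
  | cons p t ih =>
    intro d k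
    have hstep : (pvBestStep d p).get? k
        = if (p.2.1, p.2.2.1) = k then pvMStep (d.get? k) p else d.get? k := by
      by_cases hk : (p.2.1, p.2.2.1) = k
      · subst hk
        simp only [if_pos rfl, pvBestStep, pvMStep]
        cases hc : d.get? (p.2.1, p.2.2.1) with
        | none => simp [PySem.Dict.get?_insert_self, pvPhi]
        | some c =>
          by_cases hlt : p.2.2.2.2 < c.1 ∨ (p.2.2.2.2 = c.1 ∧ p.1 < c.2.1)
          · simp [hlt, PySem.Dict.get?_insert_self, pvPhi]
          · simp [hlt, hc]
      · rw [if_neg hk, pvBestStep]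
        cases hc : d.get? (p.2.1, p.2.2.1) with
        | none => exact PySem.Dict.get?_insert_of_ne d _ (fun h => hk h.symm)
        | some c =>
          by_cases hlt : p.2.2.2.2 < c.1 ∨ (p.2.2.2.2 = c.1 ∧ p.1 < c.2.1)
          · simp only [hlt, if_pos]
            exact PySem.Dict.get?_insert_of_ne d _ (fun h => hk h.symm)
          · simp [hlt]
    by_cases hk : (p.2.1, p.2.2.1) = k
    · simp only [List.foldl_cons, List.filter_cons, beq_iff_eq, hk, if_pos, decide_true]
      rw [ih, hstep, if_pos hk]
    · simp only [List.foldl_cons, List.filter_cons, beq_iff_eq, hk, decide_false,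
        Bool.false_eq_true, if_neg, not_false_iff]
      rw [ih, hstep, if_neg hk]

theorem pv_best_keys : ∀ (E : List pvP) (d : PySem.Dict (String × String) pvT),
    (E.foldl pvBestStep d).keys
      = PySem.Set.update d.keys (E.map (fun p => (p.2.1, p.2.2.1))) := by
  intro E
  induction E with
  | nil => intro d; simp [PySem.Set.update]
  | cons p t ih =>
    intro d
    have hstep : (pvBestStep d p).keys = PySem.Set.add d.keys (p.2.1, p.2.2.1) := by
      rw [pvBestStep]
      cases hc : d.get? (p.2.1, p.2.2.1) with
      | none =>
        have hcont : d.contains (p.2.1, p.2.2.1) = false := by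
          rw [PySem.Dict.contains_eq_isSome_get?, hc]; rfl
        have hmem : (p.2.1, p.2.2.1) ∉ d.keys := by
          intro hm
          have := (PySem.Dict.contains_iff_mem_keys d _).mpr hm
          rw [hcont] at this; exact Bool.false_ne_true this
        rw [PySem.Dict.keys_insert_of_not_contains d _ hcont]
        simp [PySem.Set.add, hmem]
      | some c =>
        have hcont : d.contains (p.2.1, p.2.2.1) = true := by
          rw [PySem.Dict.contains_eq_isSome_get?, hc]; rfl
        have hmem : (p.2.1, p.2.2.1) ∈ d.keys :=
          (PySem.Dict.contains_iff_mem_keys d _).mp hcont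
        by_cases hlt : p.2.2.2.2 < c.1 ∨ (p.2.2.2.2 = c.1 ∧ p.1 < c.2.1)
        · simp only [hlt, if_pos]
          rw [PySem.Dict.keys_insert_of_contains d _ hcont]
          simp [PySem.Set.add, hmem]
        · simp only [hlt, if_neg, not_false_iff]
          simp [PySem.Set.add, hmem]
    simp only [List.foldl_cons, List.map_cons]
    rw [ih, hstep]
    rfl

-- dedup commutes with mapping then dedup
theorem pv_ofList_map {α β : Type} [BEq α] [LawfulBEq α] [BEq β] [LawfulBEq β] (f : α → β) :
    ∀ xs : List α, PySem.Set.ofList ((PySem.Set.ofList xs).map f) = PySem.Set.ofList (xs.map f) := by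
  intro xs
  induction xs using List.reverseRecOn with
  | nil => rfl
  | append_singleton xs x ih =>
    have hofa : ∀ (l : List α) (y : α),
        PySem.Set.ofList (l ++ [y]) = PySem.Set.add (PySem.Set.ofList l) y := by
      intro l y
      rw [PySem.Set.ofList_eq_foldl, PySem.Set.ofList_eq_foldl, List.foldl_append]
      rfl
    have hofb : ∀ (l : List β) (y : β),
        PySem.Set.ofList (l ++ [y]) = PySem.Set.add (PySem.Set.ofList l) y := by
      intro l y
      rw [PySem.Set.ofList_eq_foldl, PySem.Set.ofList_eq_foldl, List.foldl_append]
      rfl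
    rw [hofa, List.map_append, List.map_singleton, hofb]
    by_cases hx : x ∈ PySem.Set.ofList xs
    · have hx' : x ∈ xs := (PySem.Set.mem_ofList _ _).mp hx
      have h1 : PySem.Set.add (PySem.Set.ofList xs) x = PySem.Set.ofList xs := by
        simp [PySem.Set.add, hx']
      have hfx : f x ∈ xs.map f := List.mem_map.mpr ⟨x, hx', rfl⟩
      have h2 : PySem.Set.add (PySem.Set.ofList (xs.map f)) (f x) = PySem.Set.ofList (xs.map f) := by
        simp [PySem.Set.add]
        exact ⟨x, hx', rfl⟩
      rw [h1, h2, ih]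
    · have hx' : x ∉ xs := fun h => hx ((PySem.Set.mem_ofList _ _).mpr h)
      have h1 : PySem.Set.add (PySem.Set.ofList xs) x = PySem.Set.ofList xs ++ [x] := by
        simp [PySem.Set.add, hx']
      rw [h1, List.map_append, List.map_singleton, hofb, ih]

theorem pv_ltT_trans {a b c : pvT} : pvLtT a b → pvLtT b c → pvLtT a c := by
  unfold pvLtT; omega

theorem pv_m3a : ∀ (l : List pvP) (t : pvT),
    ∃ t', l.foldl pvMStep (some t) = some t'
      ∧ (t' = t ∨ ∃ p ∈ l, t' = pvPhi p)
      ∧ ¬ pvLtT t t'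
      ∧ ∀ q ∈ l, ¬ pvLtT (pvPhi q) t' := by
  intro l
  induction l with
  | nil =>
    intro t
    exact ⟨t, rfl, Or.inl rfl, by unfold pvLtT; omega, by simp⟩
  | cons p t ih =>
    intro c
    have hstep : pvMStep (some c) p = if pvLtT (pvPhi p) c then some (pvPhi p) else some c := by
      unfold pvMStep pvLtT pvPhi
      rfl
    by_cases h : pvLtT (pvPhi p) c
    · obtain ⟨t', he, hsrc, hle, hall⟩ := ih (pvPhi p)
      refine ⟨t', ?_, ?_, ?_, ?_⟩
      · rw [List.foldl_cons, hstep, if_pos h]; exact he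
      · rcases hsrc with rfl | ⟨q, hq, rfl⟩
        · exact Or.inr ⟨p, by simp⟩
        · exact Or.inr ⟨q, by simp [hq]⟩
      · intro hcon
        exact hle (pv_ltT_trans h hcon)
      · intro q hq
        rcases List.mem_cons.mp hq with rfl | hq
        · exact hle
        · exact hall q hq
    · obtain ⟨t', he, hsrc, hle, hall⟩ := ih c
      refine ⟨t', ?_, ?_, hle, ?_⟩
      · rw [List.foldl_cons, hstep, if_neg h]; exact he
      · rcases hsrc with rfl | ⟨q, hq, rfl⟩
        · exact Or.inl rfl
        · exact Or.inr ⟨q, by simp [hq]⟩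
      · intro q hq
        rcases List.mem_cons.mp hq with rfl | hq
        · intro hcon
          revert h hle hcon
          unfold pvLtT
          omega
        · exact hall q hq

theorem pv_tm_min : ∀ l : List pvP, l ≠ [] →
    ∃ p ∈ l, l.foldl pvMStep none = some (pvPhi p)
      ∧ ∀ r ∈ l, ¬ pvLtT (pvPhi r) (pvPhi p) := by
  intro l hne
  cases l with
  | nil => exact absurd rfl hne
  | cons p0 t =>
    obtain ⟨t', he, hsrc, hle, hall⟩ := pv_m3a t (pvPhi p0)
    have he' : (p0 :: t).foldl pvMStep none = some t' := by
      rw [List.foldl_cons]; exact he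
    rcases hsrc with rfl | ⟨p, hp, rfl⟩
    · refine ⟨p0, by simp, he', ?_⟩
      intro r hr
      rcases List.mem_cons.mp hr with rfl | hr
      · exact hle
      · exact hall r hr
    · refine ⟨p, by simp [hp], he', ?_⟩
      intro r hr
      rcases List.mem_cons.mp hr with rfl | hr
      · exact hle
      · exact hall r hr

-- a defaultdict(list)-append loop: the entry of a key is the key's filtered sublist
theorem pv_group_getD {κ β γ : Type} [BEq κ] [LawfulBEq κ] (key : γ → κ) (val : γ → β)
    (xs : List γ) (d : PySem.Dict κ (List β)) (u : κ) :
    (xs.foldl (fun d x => d.modify (key x) [] (fun v => v ++ [val x])) d).getD u []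
      = d.getD u [] ++ (xs.filter (fun x => key x == u)).map val := by
  have h := PySem.Dict.getD_foldl_modify_append (xs.map (fun x => (key x, val x))) d u
  rw [List.foldl_map] at h
  simpa [List.filter_map, Function.comp_def] using h

-- Set.update from [] is Set.ofList
theorem pv_update_nil_eq_ofList {α : Type} [BEq α] (l : List α) :
    PySem.Set.update [] l = PySem.Set.ofList l := by
  rw [PySem.Set.ofList_eq_foldl]; rfl

-- ---- the per-user equality: A's sort-then-dedup = B's dedup-then-sort ----

theorem pv_peruser (inters : List pvR) (u : String) :
    pvDD PySem.Set.empty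
        (PySem.List.sorted (inters.filter (fun r => r.1 == u)) (fun r => r.2.2.2))
      = (PySem.List.sorted2
            ((((PySem.List.enumerate inters 0).foldl pvBestStep
                PySem.Dict.empty).items.filter (fun q => q.1.1 == u)).map (fun q => q.2))
            (fun t => t.1) (fun t => t.2.1)).map (fun t => t.2.2) := by
  -- names
  set E := PySem.List.enumerate inters 0 with hE
  set Eu := E.filter (fun p => p.2.1 == u) with hEu
  set S := PySem.List.sorted2 Eu (fun p : pvP => p.2.2.2.2) (fun p => p.1) with hS
  set best := E.foldl pvBestStep PySem.Dict.empty with hbest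
  have t0 : pvT := ((0 : Int), (0 : Int), (("" : String), ("" : String), (0 : Int), (0 : Int)))
  -- ---- A side: filter commutes with enumerate, stable sort = lex sort of pairs ----
  have hfilter : inters.filter (fun r => r.1 == u) = Eu.map (fun p => p.2) := by
    conv_lhs => rw [← PySem.List.map_snd_enumerate inters 0]
    exact List.filter_map
  have hEtag : Eu.Pairwise (fun p q : pvP => p.1 < q.1) :=
    List.Pairwise.sublist List.filter_sublist (PySem.List.pairwise_lt_enumerate inters 0)
  have hstable : PySem.List.sorted (Eu.map (fun p => p.2)) (fun r : pvR => r.2.2.2)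
      = S.map (fun p => p.2) := pv_stable _ Eu hEtag
  -- ---- strictness of S ----
  have hSperm : S.Perm Eu := PySem.List.sorted2_perm Eu _ _ false
  have hEnodup : (E.map (fun p : pvP => p.1)).Nodup := by
    rw [hE, PySem.List.map_fst_enumerate]
    exact PySem.List.nodup_pyRange_one _ _
  have hEunodup : (Eu.map (fun p : pvP => p.1)).Nodup :=
    hEnodup.sublist (List.Sublist.map _ List.filter_sublist)
  have hSnodup1 : (S.map (fun p : pvP => p.1)).Nodup :=
    ((hSperm.map _).nodup_iff).mpr hEunodup
  have hSpair : S.Pairwise pvLtP := by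
    have h1 := pv_sorted2_pairwise Eu (fun p : pvP => p.2.2.2.2) (fun p => p.1)
    have h2 : S.Pairwise (fun a b : pvP => a.1 ≠ b.1) := List.pairwise_map.mp hSnodup1
    rw [← hS] at h1
    refine (h1.and h2).imp ?_
    intro a b ⟨hc, hne⟩
    rw [pv_cmp_false_iff] at hc
    unfold pvLtP
    omega
  -- ---- B side: keys and entries of `best` ----
  have hbkeys : best.keys = PySem.Set.ofList (E.map (fun p => (p.2.1, p.2.2.1))) := by
    rw [hbest, pv_best_keys, PySem.Dict.keys_empty, pv_update_nil_eq_ofList]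
  have hbnodup : best.keys.Nodup := by rw [hbkeys]; exact PySem.Set.nodup_ofList _
  have hitems : best.items = best.keys.map (fun k => (k, best.getD k t0)) :=
    PySem.Dict.items_eq_map_keys best hbnodup t0
  have hget : ∀ k, best.get? k
      = (E.filter (fun p => (p.2.1, p.2.2.1) == k)).foldl pvMStep none := by
    intro k
    rw [hbest, pv_best_get?, PySem.Dict.get?_empty]
  have hfilterk : ∀ j : String,
      E.filter (fun p => (p.2.1, p.2.2.1) == (u, j)) = Eu.filter (fun p => p.2.2.1 == j) := by
    intro j
    rw [hEu, List.filter_filter]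
    apply List.filter_congr
    intro p _
    rw [Bool.eq_iff_iff]
    simp [Prod.ext_iff, and_comm]
  -- the per-item minimum representative
  have hrepsu : (best.items.filter (fun q => q.1.1 == u)).map (fun q => q.2)
      = ((best.keys.filter (fun k => k.1 == u)).map (fun k => k.2)).map
          (fun j => ((Eu.filter (fun p => p.2.2.1 == j)).foldl pvMStep none).getD t0) := by
    rw [hitems, List.filter_map, List.map_map, List.map_map]
    apply List.map_congr_left
    intro k hk
    have hku : k.1 = u := by
      have := (List.mem_filter.mp hk).2
      simpa using this
    have hkk : k = (u, k.2) := by rw [← hku]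
    simp only [Function.comp_def]
    rw [PySem.Dict.getD_eq_get?_getD, hget k, hkk, hfilterk k.2]
  -- the dedup list: every kept element is its item's minimum
  have hcrux : ∀ q ∈ pvDDE PySem.Set.empty S,
      pvPhi q = ((Eu.filter (fun p => p.2.2.1 == q.2.2.1)).foldl pvMStep none).getD t0 := by
    intro q hq
    have hqS : q ∈ S := (pv_dde_sublist S _).mem hq
    have hqEu : q ∈ Eu := hSperm.mem_iff.mp hqS
    have hqf : q ∈ Eu.filter (fun p => p.2.2.1 == q.2.2.1) :=
      List.mem_filter.mpr ⟨hqEu, by simp⟩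
    obtain ⟨p, hp, he, hall⟩ := pv_tm_min (Eu.filter (fun p => p.2.2.1 == q.2.2.1))
      (List.ne_nil_of_mem hqf)
    have hpEu : p ∈ Eu := (List.mem_filter.mp hp).1
    have hpitem : p.2.2.1 = q.2.2.1 := by
      have := (List.mem_filter.mp hp).2
      simpa using this
    have hpq : p = q := by
      by_contra hne
      have hpS : p ∈ S := hSperm.mem_iff.mpr hpEu
      rcases pv_dde_min S _ hSpair q hq p hpS hpitem with h | h
      · exact hne h.symm
      · refine hall q hqf ?_
        simp only [pvLtP, pvLtT, pvPhi] at h ⊢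
        omega
    rw [he, hpq]
    rfl
  -- identify the two item lists
  have hI : ((pvDDE PySem.Set.empty S).map (fun p => p.2.2.1)).Perm
      ((best.keys.filter (fun k => k.1 == u)).map (fun k => k.2)) := by
    have hn1 : ((pvDDE PySem.Set.empty S).map (fun p => p.2.2.1)).Nodup :=
      pv_dde_nodup_item S _
    have hkfn : (best.keys.filter (fun k => k.1 == u)).Nodup :=
      List.Nodup.filter _ hbnodup
    have hn2 : ((best.keys.filter (fun k => k.1 == u)).map (fun k => k.2)).Nodup := by
      refine List.pairwise_map.mpr (List.Pairwise.imp_of_mem ?_ hkfn)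
      intro a b ha hb hne heq
      have hau : a.1 = u := by have := (List.mem_filter.mp ha).2; simpa using this
      have hbu : b.1 = u := by have := (List.mem_filter.mp hb).2; simpa using this
      exact hne (Prod.ext (hau.trans hbu.symm) heq)
    refine (List.perm_ext_iff_of_nodup hn1 hn2).mpr ?_
    intro j
    have hleft : j ∈ (pvDDE PySem.Set.empty S).map (fun p => p.2.2.1)
        ↔ j ∈ Eu.map (fun p => p.2.2.1) := by
      rw [pv_dde_mem_item]
      constructor
      · rintro ⟨h, -⟩
        exact (hSperm.map _).mem_iff.mp h
      · intro h
        exact ⟨(hSperm.map _).mem_iff.mpr h, by simp [PySem.Set.empty]⟩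
    have hright : j ∈ (best.keys.filter (fun k => k.1 == u)).map (fun k => k.2)
        ↔ (u, j) ∈ best.keys := by
      constructor
      · intro h
        obtain ⟨k, hk, rfl⟩ := List.mem_map.mp h
        have hku : k.1 = u := by have := (List.mem_filter.mp hk).2; simpa using this
        have : k = (u, k.2) := by rw [← hku]
        rw [← this]
        exact (List.mem_filter.mp hk).1
      · intro h
        exact List.mem_map.mpr ⟨(u, j), List.mem_filter.mpr ⟨h, by simp⟩, rfl⟩
    rw [hleft, hright, hbkeys, PySem.Set.mem_ofList]
    constructor
    · intro h
      obtain ⟨p, hp, hpj⟩ := List.mem_map.mp h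
      have hpEu := List.mem_filter.mp hp
      refine List.mem_map.mpr ⟨p, hpEu.1, ?_⟩
      have : p.2.1 = u := by simpa using hpEu.2
      rw [this, hpj]
    · intro h
      obtain ⟨p, hp, hpj⟩ := List.mem_map.mp h
      have h1 : p.2.1 = u := (Prod.mk.injEq _ _ _ _).mp hpj |>.1
      have h2 : p.2.2.1 = j := (Prod.mk.injEq _ _ _ _).mp hpj |>.2
      exact List.mem_map.mpr ⟨p, List.mem_filter.mpr ⟨hp, by simp [h1]⟩, h2⟩
  -- B's sort of the representatives is exactly the deduped A list (as triples)
  have hsorted2 : PySem.List.sorted2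
        ((best.items.filter (fun q => q.1.1 == u)).map (fun q => q.2))
        (fun t : pvT => t.1) (fun t => t.2.1)
      = (pvDDE PySem.Set.empty S).map pvPhi := by
    refine pv_sorted2_eq _ _ _ _ ?_ ?_
    · -- permutation
      rw [hrepsu]
      have h1 : (pvDDE PySem.Set.empty S).map pvPhi
          = ((pvDDE PySem.Set.empty S).map (fun p => p.2.2.1)).map
              (fun j => ((Eu.filter (fun p => p.2.2.1 == j)).foldl pvMStep none).getD t0) := by
        rw [List.map_map]
        exact List.map_congr_left (fun q hq => hcrux q hq)
      rw [h1]
      exact hI.map _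
    · -- strict pairwise order
      refine List.pairwise_map.mpr ?_
      have hps := List.Pairwise.sublist (pv_dde_sublist S PySem.Set.empty) hSpair
      refine hps.imp ?_
      intro a b h
      rw [pv_cmp_true_iff]
      simp only [pvLtP, pvPhi] at h ⊢
      omega
  calc pvDD PySem.Set.empty
        (PySem.List.sorted (inters.filter (fun r => r.1 == u)) (fun r => r.2.2.2))
      = pvDD PySem.Set.empty (S.map (fun p => p.2)) := by rw [hfilter, hstable]
    _ = (pvDDE PySem.Set.empty S).map (fun p => p.2) := pv_dd_map S _
    _ = ((pvDDE PySem.Set.empty S).map pvPhi).map (fun t => t.2.2) := by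
        rw [List.map_map]; rfl
    _ = _ := by rw [hsorted2]

-- ===== VERDICT (by name: the statement is the Claim_ definition above) =====
theorem pv_A_flatMap (inters : List pvR) :
    make_inters_in_order inters
      = (PySem.Set.ofList (inters.map (fun r => r.1))).flatMap
          (fun u => pvDD PySem.Set.empty
            (PySem.List.sorted (inters.filter (fun r => r.1 == u)) (fun r => r.2.2.2))) := by
  unfold make_inters_in_order
  dsimp only
  have hAkeys : (inters.foldl (fun d inter => d.modify inter.1 [] (fun v => v ++ [inter]))
      PySem.Dict.empty).keys = PySem.Set.ofList (inters.map (fun r => r.1)) := by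
    rw [PySem.Dict.keys_foldl_modify_key inters (fun r => r.1) []
      (fun _ r => fun v => v ++ [r]) PySem.Dict.empty, PySem.Dict.keys_empty,
      pv_update_nil_eq_ofList]
  have hAget : ∀ u, (inters.foldl (fun d inter => d.modify inter.1 [] (fun v => v ++ [inter]))
      PySem.Dict.empty).getD u [] = inters.filter (fun r => r.1 == u) := by
    intro u
    have h := pv_group_getD (fun r : pvR => r.1) (fun r => r) inters PySem.Dict.empty u
    simpa using h
  have hfun : (fun (new_inters : List pvR) (user : String) =>
        ((PySem.List.sorted ((inters.foldl
            (fun d inter => d.modify inter.1 [] (fun v => v ++ [inter]))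
            PySem.Dict.empty).getD user []) (fun d => d.2.2.2)).foldl pvDedupStep
          (new_inters, PySem.Set.empty)).1)
      = fun acc u => acc ++ pvDD PySem.Set.empty
          (PySem.List.sorted (inters.filter (fun r => r.1 == u)) (fun r => r.2.2.2)) := by
    funext acc u
    rw [pv_foldl_dedup, hAget]
  rw [hAkeys, hfun, PySem.List.foldl_append_eq_flatMap]
  simp

theorem pv_B_flatMap (inters : List pvR) :
    make_inters_in_order_alt inters
      = (PySem.Set.ofList (inters.map (fun r => r.1))).flatMap
          (fun u => (PySem.List.sorted2
              ((((PySem.List.enumerate inters 0).foldl pvBestStep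
                  PySem.Dict.empty).items.filter (fun q => q.1.1 == u)).map (fun q => q.2))
              (fun t => t.1) (fun t => t.2.1)).map (fun t => t.2.2)) := by
  unfold make_inters_in_order_alt
  dsimp only
  set E := PySem.List.enumerate inters 0 with hE
  set best := E.foldl pvBestStep PySem.Dict.empty with hbest
  set groups := best.items.foldl (fun d q => d.modify q.1.1 [] (fun v => v ++ [q.2]))
    PySem.Dict.empty with hgroups
  have t0 : pvT := ((0 : Int), (0 : Int), (("" : String), ("" : String), (0 : Int), (0 : Int)))
  have hgkeys : groups.keys = PySem.Set.ofList (best.items.map (fun q => q.1.1)) := by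
    rw [hgroups, PySem.Dict.keys_foldl_modify_key best.items (fun q => q.1.1) []
      (fun _ q => fun v => v ++ [q.2]) PySem.Dict.empty, PySem.Dict.keys_empty,
      pv_update_nil_eq_ofList]
  have hgnodup : groups.keys.Nodup := by rw [hgkeys]; exact PySem.Set.nodup_ofList _
  have hgget : ∀ u, groups.getD u []
      = (best.items.filter (fun q => q.1.1 == u)).map (fun q => q.2) := by
    intro u
    have h := pv_group_getD (fun q : (String × String) × pvT => q.1.1) (fun q => q.2)
      best.items PySem.Dict.empty u
    simpa using h
  have hbkeys : best.keys = PySem.Set.ofList (E.map (fun p => (p.2.1, p.2.2.1))) := by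
    rw [hbest, pv_best_keys, PySem.Dict.keys_empty, pv_update_nil_eq_ofList]
  have hbnodup : best.keys.Nodup := by rw [hbkeys]; exact PySem.Set.nodup_ofList _
  have hitems : best.items = best.keys.map (fun k => (k, best.getD k t0)) :=
    PySem.Dict.items_eq_map_keys best hbnodup t0
  have hkeysus : groups.keys = PySem.Set.ofList (inters.map (fun r => r.1)) := by
    rw [hgkeys, hitems, List.map_map]
    have e1 : ((fun q : (String × String) × pvT => q.1.1) ∘ (fun k => (k, best.getD k t0)))
        = fun k : String × String => k.1 := rfl
    rw [e1, hbkeys, pv_ofList_map, List.map_map]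
    have e2 : ((fun k : String × String => k.1) ∘ (fun p : pvP => (p.2.1, p.2.2.1)))
        = (fun r : pvR => r.1) ∘ (fun p : pvP => p.2) := rfl
    rw [e2, ← List.map_map, hE, PySem.List.map_snd_enumerate]
  rw [PySem.List.foldl_append_eq_flatMap,
    PySem.Dict.values_eq_map_keys groups hgnodup [], List.flatMap_map, hkeysus]
  simp only [hgget]
  simp

theorem make_inters_in_order_spec : Claim_equal_make_inters_in_order := by
  intro inters _
  unfold Spec_make_inters_in_order
  rw [pv_A_flatMap, pv_B_flatMap]
  rw [show (fun u => pvDD PySem.Set.empty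
        (PySem.List.sorted (inters.filter (fun r => r.1 == u)) (fun r => r.2.2.2)))
      = (fun u => (PySem.List.sorted2
          ((((PySem.List.enumerate inters 0).foldl pvBestStep
              PySem.Dict.empty).items.filter (fun q => q.1.1 == u)).map (fun q => q.2))
          (fun t => t.1) (fun t => t.2.1)).map (fun t => t.2.2))
    from funext (fun u => pv_peruser inters u)]
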